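-- pv_equiv track=rewrite | github.com/goalsgame/asset-pipeline | asset_pipeline/core/textures/mips.py | get_all_mipmap_coordinates
-- ===== SOURCE A (Python) =====
-- import math
--
-- def get_num_mips(width, height):
--     """
--     Calculate the number of mip levels for given base dimensions.
--     """
--     return int(math.log2(max(width, height))) + 1
--
-- def get_coord_for_mip(base_x, base_width, base_height, mip_index):
--     """
--     Given a base position and size, return the coordinates of a specific mip level.
--     Each mip is placed sequentially in the X direction.
--     """
--     w = max(base_width >> mip_index, 1)
--     h = max(base_height >> mip_index, 1)
--     x0 = base_x
--     x1 = x0 + w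
--     y0 = 0
--     y1 = h
--     return (x0, y0, x1, y1), w  # Return new width to update x offset
--
-- def get_all_mipmap_coordinates(atlas_width, atlas_height):
--     """
--     Compute all mipmap slice coordinates in a single row layout.
--     """
--     base_width = atlas_width // 2
--     base_height = atlas_height
--     num_mips = get_num_mips(max(base_width, 1), max(base_height, 1))
--
--     coords = []
--     x_offset = 0
--     for mip in range(num_mips):
--         coord, w = get_coord_for_mip(x_offset, base_width, base_height, mip)
--         coords.append(coord)
--         x_offset += w
--     return coords
-- ===== SOURCE B (Python) =====
-- import math
--
-- def get_all_mipmap_coordinates(atlas_width, atlas_height):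
--     """
--     Compute all mipmap slice coordinates in a single row layout.
--     Builds the per-mip sizes first, then pairs them with the exclusive
--     prefix sums of the widths (no running x_offset state).
--     """
--     bw = atlas_width // 2
--     bh = atlas_height
--     n = int(math.log2(max(max(bw, 1), max(bh, 1)))) + 1
--     sizes = [(max(bw >> i, 1), max(bh >> i, 1)) for i in range(n)]
--     widths = [w for w, _ in sizes]
--     offsets = [sum(widths[:i]) for i in range(n)]
--     return [(x, 0, x + w, h) for x, (w, h) in zip(offsets, sizes)]
-- ===== Notes on version B (the rewrite author's own statement) =====
-- stated objective: alternative
-- what changed: Replaces the stateful loop carrying a running x_offset with a data-flow decomposition: build the (w,h) size list, take exclusive prefix sums of the widths as x-offsets, and zip them into tuples.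
import Mathlib
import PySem

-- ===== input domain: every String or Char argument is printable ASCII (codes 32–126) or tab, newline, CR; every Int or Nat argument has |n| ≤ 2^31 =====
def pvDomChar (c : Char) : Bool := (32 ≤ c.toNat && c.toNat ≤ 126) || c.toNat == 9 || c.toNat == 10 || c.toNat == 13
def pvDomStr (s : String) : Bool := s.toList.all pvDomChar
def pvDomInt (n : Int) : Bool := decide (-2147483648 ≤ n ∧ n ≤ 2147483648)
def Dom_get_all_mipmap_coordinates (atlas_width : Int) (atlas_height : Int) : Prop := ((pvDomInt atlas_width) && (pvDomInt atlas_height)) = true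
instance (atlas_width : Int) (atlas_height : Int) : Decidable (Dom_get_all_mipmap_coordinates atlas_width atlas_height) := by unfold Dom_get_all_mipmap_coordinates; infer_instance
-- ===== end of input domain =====

-- B replaces A's stateful loop (running x_offset) with a data-flow decomposition:
-- size list, exclusive prefix sums of the widths as offsets, then zip; objective: alternative.

-- ===== PORT A =====

-- int(math.log2(m)) + 1; for the arguments A passes (max ... ≥ 1, ≤ 2^31) the float
-- log2 is exact enough that int(math.log2 m) = Nat.log2 m.
def get_num_mips (width height : Int) : Int :=
  ((Nat.log2 (max width height).toNat : Int)) + 1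

-- mip_index is a range(...) index, always ≥ 0, so .toNat is exact; Int >>> Nat is
-- Python's arithmetic >> (floors, also on negatives).
def get_coord_for_mip (base_x base_width base_height mip_index : Int) :
    (Int × Int × Int × Int) × Int :=
  let w := max (base_width >>> mip_index.toNat) 1
  let h := max (base_height >>> mip_index.toNat) 1
  let x0 := base_x
  let x1 := x0 + w
  let y0 : Int := 0
  let y1 := h
  ((x0, y0, x1, y1), w)

def get_all_mipmap_coordinates (atlas_width : Int) (atlas_height : Int) : List (Int × Int × Int × Int) :=
  let base_width := PySem.Int.floordiv atlas_width 2
  let base_height := atlas_height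
  let num_mips := get_num_mips (max base_width 1) (max base_height 1)
  let st := (PySem.List.pyRange 0 num_mips 1).foldl
    (fun (acc : List (Int × Int × Int × Int) × Int) mip =>
      let cw := get_coord_for_mip acc.2 base_width base_height mip
      (acc.1 ++ [cw.1], acc.2 + cw.2)) ([], 0)
  st.1

-- ===== PORT B =====

-- Transliteration of Source B: sizes list, widths, exclusive prefix sums (sum of a
-- slice widths[:i], i ≥ 0, = sum of take i.toNat), zip into the coordinate tuples.
def get_all_mipmap_coordinates_alt (atlas_width : Int) (atlas_height : Int) : List (Int × Int × Int × Int) :=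
  let bw := PySem.Int.floordiv atlas_width 2
  let bh := atlas_height
  let n : Int := ((Nat.log2 (max (max bw 1) (max bh 1)).toNat : Int)) + 1
  let sizes := (PySem.List.pyRange 0 n 1).map
    (fun i => (max (bw >>> i.toNat) 1, max (bh >>> i.toNat) 1))
  let widths := sizes.map (fun p => p.1)
  let offsets := (PySem.List.pyRange 0 n 1).map (fun i => (widths.take i.toNat).sum)
  (offsets.zip sizes).map (fun p => (p.1, 0, p.1 + p.2.1, p.2.2))

-- ===== PRECONDITION & SPEC =====
def Spec_get_all_mipmap_coordinates (atlas_width : Int) (atlas_height : Int) (out : List (Int × Int × Int × Int)) : Prop := out = get_all_mipmap_coordinates_alt atlas_width atlas_height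
instance (atlas_width : Int) (atlas_height : Int) (out : List (Int × Int × Int × Int)) : Decidable (Spec_get_all_mipmap_coordinates atlas_width atlas_height out) := by unfold Spec_get_all_mipmap_coordinates; infer_instance

-- ===== CLAIM (what is proved, stated in full; the proofs are below) =====
def Claim_equal_get_all_mipmap_coordinates : Prop := ∀ (atlas_width : Int) (atlas_height : Int), Dom_get_all_mipmap_coordinates atlas_width atlas_height → Spec_get_all_mipmap_coordinates atlas_width atlas_height (get_all_mipmap_coordinates atlas_width atlas_height)

-- ===== LEMMAS AND PROOFS =====

-- Exclusive prefix sum of f over range i.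
def pvPS (f : Nat → Int) (i : Nat) : Int := ((List.range i).map f).sum

-- Characterisation of A's fold: the final state is (map of the closed-form rows, total width).
theorem pvFoldChar (n : Nat) (f g : Nat → Int) :
    (List.range n).foldl
      (fun (acc : List (Int × Int × Int × Int) × Int) i =>
        (acc.1 ++ [(acc.2, 0, acc.2 + f i, g i)], acc.2 + f i)) ([], 0)
    = ((List.range n).map (fun i => (pvPS f i, 0, pvPS f i + f i, g i)), pvPS f n) := by
  induction n with
  | zero => simp [pvPS]
  | succ n ih =>
    rw [List.range_succ, List.foldl_append, ih, List.map_append]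
    simp [pvPS, List.range_succ]

theorem get_all_mipmap_coordinates_eq (aw ah : Int) :
    get_all_mipmap_coordinates aw ah = get_all_mipmap_coordinates_alt aw ah := by
  unfold get_all_mipmap_coordinates get_all_mipmap_coordinates_alt get_num_mips get_coord_for_mip
  simp only []
  generalize PySem.Int.floordiv aw 2 = bw
  generalize hN : Nat.log2 (max (max bw 1) (max ah 1)).toNat + 1 = N
  have hcast : ((Nat.log2 (max (max bw 1) (max ah 1)).toNat : Int)) + 1 = (N : Int) := by
    rw [← hN]; push_cast; ring
  rw [hcast]
  rw [PySem.List.pyRange_zero_natCast, List.foldl_map]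
  simp only [List.map_map, Function.comp_def, Int.toNat_natCast]
  -- A side: characterise the fold
  have hA := pvFoldChar N (fun k => max (bw >>> k) 1) (fun k => max (ah >>> k) 1)
  rw [hA]
  -- B side: zip of two maps over the same list, then pointwise
  rw [List.zip_map', List.map_map]
  apply List.map_congr_left
  intro k hk
  have hk' : k < N := List.mem_range.mp hk
  simp only [Function.comp_def]
  -- rewrite the take of the mapped range as a prefix-sum
  simp only [pvPS]
  rw [← List.map_take, List.take_range, Nat.min_eq_left hk'.le]
  simp [Int.shiftRight_natCast_right]

-- ===== VERDICT (by name: the statement is the Claim_ definition above) =====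
theorem get_all_mipmap_coordinates_spec : Claim_equal_get_all_mipmap_coordinates := by
  intro aw ah _
  exact get_all_mipmap_coordinates_eq aw ah
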